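-- pv_equiv track=rewrite | github.com/vroomvroom314/Python-code-MiniProjects | Python Problems -SA/Week 7/Hw7.py | friendsOfFriends
-- ===== SOURCE A (Python) =====
-- def friendsOfFriends(d):
--     finaldict = {}
--     keys = []
--     for key,val in d.items():
--         keys.append(key)
--     #adds key elements to list
--
--     for i in range (len(keys)):
--         tempSet1 = d[keys[i]]
--         #gets the values of each key in the list
--         Valset = set()
--         #used to contain all friends of friends per key
--         for j in range (len(keys)):
--             if (keys[j] in tempSet1):
--                 tempSet2 = d[keys[j]]
--                 #gets the values of each value in the original key
--                 for k in range (len(keys)):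
--                     if (keys[k] in tempSet2 and keys[k] not in tempSet1 and
--                         keys[k] != keys[i]):
--                         Valset.add(keys[k])
--                         #adds new element if it's not the same as the orig key
--                         #new element must also not be original vals of key
--                         #new element must be vaue of original key's value
--                     finaldict[keys[i]] = Valset
--         if d[keys[i]] == set():
--             finaldict[keys[i]] = set()
--             #adds all keys that have empty sets or "no friends" to finaldict
--
--     return finaldict
-- ===== SOURCE B (Python) =====
-- def friendsOfFriends(d):
--     """For each member, the set of members reachable through a member friend,
--     excluding the member itself and its direct friends.  A member is listed
--     when it has at least one member friend, or no friends at all; members all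
--     of whose friends are outsiders do not appear."""
--     # each member's friends that are themselves members, in member order
--     known = {k: [m for m in d if m in fs] for k, fs in d.items()}
--     out = {}
--     for key, friends in d.items():
--         if known[key]:
--             fof = set()
--             for mid in known[key]:
--                 for k in known[mid]:
--                     if k not in friends and k != key:
--                         fof.add(k)
--             out[key] = fof
--         elif not friends:
--             out[key] = set()
--     return out
-- ===== Notes on version B (the rewrite author's own statement) =====
-- stated objective: alternative
-- what changed: A runs three nested scans over the full key list for every source key (and re-assigns the result entry on every innermost iteration); B precomputes once, per member, the list of its friends that are themselves members, then per source key only walks those member-friend lists, so the repeated full-key inner scans disappear.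
import Mathlib
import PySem

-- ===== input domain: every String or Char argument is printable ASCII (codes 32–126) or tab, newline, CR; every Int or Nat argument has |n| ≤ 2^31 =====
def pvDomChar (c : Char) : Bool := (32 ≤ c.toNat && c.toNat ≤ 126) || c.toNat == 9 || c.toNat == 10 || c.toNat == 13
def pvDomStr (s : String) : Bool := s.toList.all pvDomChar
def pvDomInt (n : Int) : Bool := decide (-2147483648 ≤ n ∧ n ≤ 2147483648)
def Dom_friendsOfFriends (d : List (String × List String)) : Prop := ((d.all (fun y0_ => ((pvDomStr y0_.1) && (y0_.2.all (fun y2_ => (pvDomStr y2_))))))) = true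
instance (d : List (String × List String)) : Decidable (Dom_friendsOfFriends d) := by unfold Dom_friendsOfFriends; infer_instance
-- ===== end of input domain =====

-- B precomputes, once per member, the list of its friends that are themselves members,
-- and then only walks those lists per source key, replacing A's three nested scans over
-- the full key list.  Equivalence is about the return value; neither program mutates
-- its argument.

-- ===== PORT A =====
-- keys[i] is always a valid index and keys[i] is always a key of d, so the total
-- pyGetD/getD forms with dummy defaults are exact here.
-- Python's `d[keys[i]] == set()` compares the value set with the empty set; on the
-- List-of-distinct-elements representation of sets that is exactly `tempSet1 = []`.
def friendsOfFriends (d : List (String × List String)) : List (String × List String) :=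
  let dd : PySem.Dict String (List String) := PySem.Dict.mk d
  let keys : List String := dd.items.foldl (fun ks kv => ks ++ [kv.1]) []
  let n : Int := (keys.length : Int)
  let finaldict : PySem.Dict String (List String) :=
    (PySem.List.pyRange 0 n 1).foldl (fun finaldict i =>
      let keyi := PySem.List.pyGetD keys i ""
      let tempSet1 := dd.getD keyi []
      let st :=
        (PySem.List.pyRange 0 n 1).foldl
          (fun (st : PySem.Dict String (List String) × PySem.Set String) j =>
            if PySem.Set.contains tempSet1 (PySem.List.pyGetD keys j "") then
              let tempSet2 := dd.getD (PySem.List.pyGetD keys j "") []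
              (PySem.List.pyRange 0 n 1).foldl
                (fun (st2 : PySem.Dict String (List String) × PySem.Set String) k =>
                  let keyk := PySem.List.pyGetD keys k ""
                  let vs :=
                    if PySem.Set.contains tempSet2 keyk &&
                       !(PySem.Set.contains tempSet1 keyk) && keyk != keyi then
                      PySem.Set.add st2.2 keyk
                    else st2.2
                  (st2.1.insert keyi vs, vs)) st
            else st)
          (finaldict, PySem.Set.empty)
      if tempSet1 = [] then st.1.insert keyi [] else st.1)
      PySem.Dict.empty
  finaldict.items

-- ===== PORT B =====
def friendsOfFriends_alt (d : List (String × List String)) : List (String × List String) :=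
  let dd : PySem.Dict String (List String) := PySem.Dict.mk d
  -- known = {k: [m for m in d if m in fs] for k, fs in d.items()}
  let known : PySem.Dict String (List String) :=
    dd.items.foldl (fun m kv =>
      m.insert kv.1 (dd.keys.filter (fun x => PySem.Set.contains kv.2 x))) PySem.Dict.empty
  let out : PySem.Dict String (List String) :=
    dd.items.foldl (fun out kv =>
      let key := kv.1
      let friends := kv.2
      if known.getD key [] ≠ [] then
        let fof : PySem.Set String :=
          (known.getD key []).foldl (fun fof mid =>
            (known.getD mid []).foldl (fun fof k =>
              if !(PySem.Set.contains friends k) && k != key then PySem.Set.add fof k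
              else fof) fof)
            PySem.Set.empty
        out.insert key fof
      else if friends = [] then out.insert key [] else out) PySem.Dict.empty
  out.items

-- ===== PRECONDITION & SPEC =====
-- Pre_ excludes association lists with duplicate keys: they do not represent a Python
-- dict (A's parameter is a dict, whose keys are necessarily distinct), so no dict
-- input is excluded.
def Pre_friendsOfFriends (d : List (String × List String)) : Prop :=
  (d.map Prod.fst).Nodup
instance (d : List (String × List String)) : Decidable (Pre_friendsOfFriends d) := by
  unfold Pre_friendsOfFriends; infer_instance

def pvWitness_friendsOfFriends : (List (String × List String)) :=
  [("a", ["b"]), ("b", ["c"]), ("c", [])]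

def Spec_friendsOfFriends (d : List (String × List String)) (out : List (String × List String)) : Prop := out = friendsOfFriends_alt d
instance (d : List (String × List String)) (out : List (String × List String)) : Decidable (Spec_friendsOfFriends d out) := by unfold Spec_friendsOfFriends; infer_instance

-- ===== CLAIM (what is proved, stated in full; the proofs are below) =====
def Claim_equal_friendsOfFriends : Prop := ∀ (d : List (String × List String)), Dom_friendsOfFriends d → Pre_friendsOfFriends d → Spec_friendsOfFriends d (friendsOfFriends d)

-- ===== LEMMAS AND PROOFS =====

-- A's per-i body, as a function of keys[i]
def pvStepA (d : List (String × List String)) (fd : PySem.Dict String (List String))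
    (keyi : String) : PySem.Dict String (List String) :=
  let ks := d.map Prod.fst
  let n : Int := (ks.length : Int)
  let dd : PySem.Dict String (List String) := PySem.Dict.mk d
  let tempSet1 := dd.getD keyi []
  let st :=
    (PySem.List.pyRange 0 n 1).foldl
      (fun (st : PySem.Dict String (List String) × PySem.Set String) j =>
        if PySem.Set.contains tempSet1 (PySem.List.pyGetD ks j "") then
          let tempSet2 := dd.getD (PySem.List.pyGetD ks j "") []
          (PySem.List.pyRange 0 n 1).foldl
            (fun (st2 : PySem.Dict String (List String) × PySem.Set String) k =>
              let keyk := PySem.List.pyGetD ks k ""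
              let vs :=
                if PySem.Set.contains tempSet2 keyk &&
                   !(PySem.Set.contains tempSet1 keyk) && keyk != keyi then
                  PySem.Set.add st2.2 keyk
                else st2.2
              (st2.1.insert keyi vs, vs)) st
        else st)
      (fd, PySem.Set.empty)
  if tempSet1 = [] then st.1.insert keyi [] else st.1

-- B's known dict and per-item body
def pvKnown (d : List (String × List String)) : PySem.Dict String (List String) :=
  d.foldl (fun m kv =>
    m.insert kv.1 ((d.map Prod.fst).filter (fun x => PySem.Set.contains kv.2 x)))
    PySem.Dict.empty

def pvStepB (d : List (String × List String)) (out : PySem.Dict String (List String))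
    (kv : String × List String) : PySem.Dict String (List String) :=
  let known := pvKnown d
  let key := kv.1
  let friends := kv.2
  if known.getD key [] ≠ [] then
    let fof : PySem.Set String :=
      (known.getD key []).foldl (fun fof mid =>
        (known.getD mid []).foldl (fun fof k =>
          if !(PySem.Set.contains friends k) && k != key then PySem.Set.add fof k
          else fof) fof)
        PySem.Set.empty
    out.insert key fof
  else if friends = [] then out.insert key [] else out

lemma pvA_eq_foldl (d : List (String × List String)) :
    friendsOfFriends d
      = (d.foldl (fun fd kv => pvStepA d fd kv.1) PySem.Dict.empty).items := by
  unfold friendsOfFriends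
  simp only [PySem.List.foldl_append_singleton_eq_map]
  show ((PySem.List.pyRange 0 ((d.map (fun kv => kv.1)).length : Int) 1).foldl
      (fun fd i => pvStepA d fd (PySem.List.pyGetD (d.map (fun kv => kv.1)) i ""))
      PySem.Dict.empty).items = _
  rw [PySem.List.foldl_pyRange_zero_pyGetD', List.foldl_map]

lemma pvB_eq_foldl (d : List (String × List String)) :
    friendsOfFriends_alt d = (d.foldl (pvStepB d) PySem.Dict.empty).items := rfl

-- A's aliased `finaldict[key] = Valset` inside the loop: net effect of a nonempty pair-fold
lemma pvPairFold {alpha : Type} (l : List alpha) (hne : l ≠ []) (key : String)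
    (h : PySem.Set String → alpha → PySem.Set String)
    (fd : PySem.Dict String (List String)) (vs : PySem.Set String) :
    l.foldl (fun st x => (st.1.insert key (h st.2 x), h st.2 x)) (fd, vs)
      = (fd.insert key (l.foldl h vs), l.foldl h vs) := by
  induction l generalizing fd vs with
  | nil => cases hne rfl
  | cons x xs ih =>
    simp only [List.foldl_cons]
    rcases eq_or_ne xs [] with rfl | hxs
    · simp
    · rw [ih hxs, PySem.Dict.insert_insert_self]

lemma pvJKFold (ls : List Int) (key : String) (n : Int) (hn : 0 < n)
    (g : Int → PySem.Set String → Int → PySem.Set String)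
    (fd : PySem.Dict String (List String)) (vs : PySem.Set String) :
    ls.foldl (fun st j =>
        (PySem.List.pyRange 0 n 1).foldl
          (fun (st2 : PySem.Dict String (List String) × PySem.Set String) k =>
            (st2.1.insert key (g j st2.2 k), g j st2.2 k)) st) (fd, vs)
      = if ls = [] then (fd, vs)
        else (fd.insert key (ls.foldl (fun vs j => (PySem.List.pyRange 0 n 1).foldl (g j) vs) vs),
              ls.foldl (fun vs j => (PySem.List.pyRange 0 n 1).foldl (g j) vs) vs) := by
  have hrne : PySem.List.pyRange 0 n 1 ≠ [] := by
    have := PySem.List.length_pyRange_one 0 n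
    intro h; rw [h] at this; simp at this; omega
  induction ls generalizing fd vs with
  | nil => simp
  | cons j js ih =>
    simp only [List.foldl_cons]
    rw [pvPairFold _ hrne]
    rcases eq_or_ne js [] with rfl | hjs
    · simp
    · rw [ih]
      simp [hjs, PySem.Dict.insert_insert_self]

lemma pvIfAnd3 {alpha : Type} (p q r : Bool) (f s : alpha) :
    (if p && q && r then f else s) = if p then (if q && r then f else s) else s := by
  cases p <;> cases q <;> cases r <;> simp

-- fold over the indices of ks that satisfy q ∘ (ks[·]) IS the fold over ks.filter q
lemma pvRangeFilterFold {alpha : Type} (ks : List String) (q : String → Bool)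
    (ψ : alpha → String → alpha) (a : alpha) :
    ((PySem.List.pyRange 0 (ks.length : Int) 1).filter
        (fun j => q (PySem.List.pyGetD ks j ""))).foldl
        (fun vs j => ψ vs (PySem.List.pyGetD ks j "")) a
      = (ks.filter q).foldl ψ a := by
  rw [List.foldl_filter,
    PySem.List.foldl_pyRange_zero_pyGetD' ks ""
      (fun vs s => if q s then ψ vs s else vs) a, ← List.foldl_filter]

lemma pvFilterNil (ks : List String) (q : String → Bool) :
    ((PySem.List.pyRange 0 (ks.length : Int) 1).filter
        (fun j => q (PySem.List.pyGetD ks j "")) = [])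
      ↔ (ks.filter q = []) := by
  simp only [List.filter_eq_nil_iff, PySem.List.mem_pyRange_one]
  constructor
  · intro h m hm
    obtain ⟨i, hi, rfl⟩ := List.getElem_of_mem hm
    have h2 := h (i : Int) ⟨by positivity, by exact_mod_cast hi⟩
    rw [PySem.List.pyGetD_eq_getElem ks "" (by positivity) (by exact_mod_cast hi)] at h2
    simpa using h2
  · intro h j hj
    have h0 : 0 ≤ j := hj.1
    have h1 : j < (ks.length : Int) := hj.2
    rw [PySem.List.pyGetD_eq_getElem ks "" h0 h1]
    exact h _ (List.getElem_mem _)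

lemma pvMk_keys_nodup (d : List (String × List String))
    (hnd : (d.map Prod.fst).Nodup) : (PySem.Dict.mk d).keys.Nodup := by
  have : (PySem.Dict.mk d).keys = d.map Prod.fst := rfl
  rwa [this]

lemma pvMk_getD (d : List (String × List String)) (hnd : (d.map Prod.fst).Nodup)
    {key : String} {fs : List String} (h : (key, fs) ∈ d) :
    (PySem.Dict.mk d).getD key [] = fs :=
  PySem.Dict.getD_of_mem_items (PySem.Dict.mk d) h (pvMk_keys_nodup d hnd) []

lemma pvKnown_items (d : List (String × List String)) (hnd : (d.map Prod.fst).Nodup) :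
    (pvKnown d).items
      = d.map (fun kv =>
          (kv.1, (d.map Prod.fst).filter (fun x => PySem.Set.contains kv.2 x))) := by
  unfold pvKnown
  rw [PySem.Dict.items_foldl_insert_fresh d Prod.fst
      (fun kv => (d.map Prod.fst).filter (fun x => PySem.Set.contains kv.2 x))
      PySem.Dict.empty (by intro a _; simp) hnd]
  rfl

lemma pvKnown_keys_nodup (d : List (String × List String))
    (hnd : (d.map Prod.fst).Nodup) : (pvKnown d).keys.Nodup := by
  have : (pvKnown d).keys = (pvKnown d).items.map Prod.fst := rfl
  rw [this, pvKnown_items d hnd, List.map_map]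
  exact hnd

lemma pvKnown_getD (d : List (String × List String)) (hnd : (d.map Prod.fst).Nodup)
    {key : String} {fs : List String} (h : (key, fs) ∈ d) :
    (pvKnown d).getD key []
      = (d.map Prod.fst).filter (fun x => PySem.Set.contains fs x) := by
  apply PySem.Dict.getD_of_mem_items (pvKnown d) _ (pvKnown_keys_nodup d hnd)
  rw [pvKnown_items d hnd]
  exact List.mem_map.mpr ⟨(key, fs), h, rfl⟩

lemma pvKnown_getD_mem (d : List (String × List String)) (hnd : (d.map Prod.fst).Nodup)
    {mid : String} (h : mid ∈ d.map Prod.fst) :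
    (pvKnown d).getD mid []
      = (d.map Prod.fst).filter
          (fun x => PySem.Set.contains ((PySem.Dict.mk d).getD mid []) x) := by
  obtain ⟨kv, hkv, rfl⟩ := List.mem_map.mp h
  rw [pvKnown_getD d hnd (show (kv.1, kv.2) ∈ d from hkv),
    pvMk_getD d hnd (show (kv.1, kv.2) ∈ d from hkv)]

lemma pvStep_eq (d : List (String × List String)) (hnd : (d.map Prod.fst).Nodup)
    (fd : PySem.Dict String (List String)) (kv : String × List String) (hkv : kv ∈ d) :
    pvStepA d fd kv.1 = pvStepB d fd kv := by
  obtain ⟨key, fs⟩ := kv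
  have ht1 : (PySem.Dict.mk d).getD key [] = fs := pvMk_getD d hnd hkv
  have hn0 : 0 < ((d.map Prod.fst).length : Int) := by
    have : d ≠ [] := by rintro rfl; cases hkv
    have : d.length ≠ 0 := fun h => this (List.eq_nil_of_length_eq_zero h)
    simp only [List.length_map]; omega
  simp only [pvStepA, pvStepB, ht1]
  rw [← List.foldl_filter]
  rw [pvJKFold _ key _ hn0
    (fun j vs k =>
      if PySem.Set.contains ((PySem.Dict.mk d).getD (PySem.List.pyGetD (d.map Prod.fst) j "") [])
           (PySem.List.pyGetD (d.map Prod.fst) k "") &&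
         !(PySem.Set.contains fs (PySem.List.pyGetD (d.map Prod.fst) k "")) &&
         (PySem.List.pyGetD (d.map Prod.fst) k "") != key then
        PySem.Set.add vs (PySem.List.pyGetD (d.map Prod.fst) k "")
      else vs) fd PySem.Set.empty]
  rw [pvKnown_getD d hnd hkv]
  -- the inner (k-) fold over indices, rewritten as a fold over the filtered key list
  have hinner : ∀ (mid : String) (vs : PySem.Set String),
      (PySem.List.pyRange 0 ((d.map Prod.fst).length : Int) 1).foldl
        (fun vs k =>
          if PySem.Set.contains ((PySem.Dict.mk d).getD mid [])
               (PySem.List.pyGetD (d.map Prod.fst) k "") &&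
             !(PySem.Set.contains fs (PySem.List.pyGetD (d.map Prod.fst) k "")) &&
             (PySem.List.pyGetD (d.map Prod.fst) k "") != key then
            PySem.Set.add vs (PySem.List.pyGetD (d.map Prod.fst) k "")
          else vs) vs
        = ((d.map Prod.fst).filter
            (fun x => PySem.Set.contains ((PySem.Dict.mk d).getD mid []) x)).foldl
            (fun vs k =>
              if !(PySem.Set.contains fs k) && k != key then PySem.Set.add vs k else vs)
            vs := by
    intro mid vs
    rw [PySem.List.foldl_pyRange_zero_pyGetD' (d.map Prod.fst) ""
      (fun vs s =>
        if PySem.Set.contains ((PySem.Dict.mk d).getD mid []) s &&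
           !(PySem.Set.contains fs s) && s != key then PySem.Set.add vs s else vs) vs]
    conv_rhs => rw [List.foldl_filter]
    apply PySem.List.foldl_congr_mem
    intro acc x _
    exact pvIfAnd3 _ _ _ _ _
  -- the outer (j-) fold over filtered indices, rewritten as a fold over the mids
  have houter :
      ((PySem.List.pyRange 0 ((d.map Prod.fst).length : Int) 1).filter
          (fun j => PySem.Set.contains fs (PySem.List.pyGetD (d.map Prod.fst) j ""))).foldl
        (fun vs j =>
          (PySem.List.pyRange 0 ((d.map Prod.fst).length : Int) 1).foldl
            (fun vs k =>
              if PySem.Set.contains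
                   ((PySem.Dict.mk d).getD (PySem.List.pyGetD (d.map Prod.fst) j "") [])
                   (PySem.List.pyGetD (d.map Prod.fst) k "") &&
                 !(PySem.Set.contains fs (PySem.List.pyGetD (d.map Prod.fst) k "")) &&
                 (PySem.List.pyGetD (d.map Prod.fst) k "") != key then
                PySem.Set.add vs (PySem.List.pyGetD (d.map Prod.fst) k "")
              else vs) vs) PySem.Set.empty
        = ((d.map Prod.fst).filter (fun x => PySem.Set.contains fs x)).foldl
            (fun vs mid =>
              ((pvKnown d).getD mid []).foldl
                (fun vs k =>
                  if !(PySem.Set.contains fs k) && k != key then PySem.Set.add vs k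
                  else vs) vs) PySem.Set.empty := by
    rw [pvRangeFilterFold (d.map Prod.fst) (fun x => PySem.Set.contains fs x)
      (fun vs mid =>
        (PySem.List.pyRange 0 ((d.map Prod.fst).length : Int) 1).foldl
          (fun vs k =>
            if PySem.Set.contains ((PySem.Dict.mk d).getD mid [])
                 (PySem.List.pyGetD (d.map Prod.fst) k "") &&
               !(PySem.Set.contains fs (PySem.List.pyGetD (d.map Prod.fst) k "")) &&
               (PySem.List.pyGetD (d.map Prod.fst) k "") != key then
              PySem.Set.add vs (PySem.List.pyGetD (d.map Prod.fst) k "")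
            else vs) vs) PySem.Set.empty]
    apply PySem.List.foldl_congr_mem
    intro acc mid hmid
    rw [hinner, pvKnown_getD_mem d hnd (List.mem_filter.mp hmid).1]
  by_cases hfs : fs = []
  · subst hfs
    have hfil : (d.map Prod.fst).filter (fun x => PySem.Set.contains ([] : List String) x)
        = [] := by simp [PySem.Set.contains]
    have hfil2 : (PySem.List.pyRange 0 ((d.map Prod.fst).length : Int) 1).filter
        (fun j => PySem.Set.contains ([] : List String)
          (PySem.List.pyGetD (d.map Prod.fst) j "")) = [] :=
      (pvFilterNil (d.map Prod.fst) _).mpr hfil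
    rw [hfil, hfil2]
    simp
  · by_cases hmids :
      (d.map Prod.fst).filter (fun x => PySem.Set.contains fs x) = []
    · have hidx : (PySem.List.pyRange 0 ((d.map Prod.fst).length : Int) 1).filter
          (fun j => PySem.Set.contains fs (PySem.List.pyGetD (d.map Prod.fst) j "")) = [] :=
        (pvFilterNil (d.map Prod.fst) (fun x => PySem.Set.contains fs x)).mpr hmids
      rw [hidx, hmids]
      simp [hfs]
    · have hidx : (PySem.List.pyRange 0 ((d.map Prod.fst).length : Int) 1).filter
          (fun j => PySem.Set.contains fs (PySem.List.pyGetD (d.map Prod.fst) j "")) ≠ [] :=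
        fun h => hmids ((pvFilterNil (d.map Prod.fst) (fun x => PySem.Set.contains fs x)).mp h)
      rw [if_neg hfs, if_neg hidx, if_pos hmids]
      rw [show ((fd.insert key (((PySem.List.pyRange 0 ((d.map Prod.fst).length : Int) 1).filter
            (fun j => PySem.Set.contains fs (PySem.List.pyGetD (d.map Prod.fst) j ""))).foldl
            (fun vs j =>
              (PySem.List.pyRange 0 ((d.map Prod.fst).length : Int) 1).foldl
                (fun vs k =>
                  if PySem.Set.contains
                       ((PySem.Dict.mk d).getD (PySem.List.pyGetD (d.map Prod.fst) j "") [])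
                       (PySem.List.pyGetD (d.map Prod.fst) k "") &&
                     !(PySem.Set.contains fs (PySem.List.pyGetD (d.map Prod.fst) k "")) &&
                     (PySem.List.pyGetD (d.map Prod.fst) k "") != key then
                    PySem.Set.add vs (PySem.List.pyGetD (d.map Prod.fst) k "")
                  else vs) vs) PySem.Set.empty), _).1
          = _) from rfl, houter]
-- ===== VERDICT (by name: the statement is the Claim_ definition above) =====
theorem friendsOfFriends_spec : Claim_equal_friendsOfFriends := by
  intro d _hdom hpre
  unfold Spec_friendsOfFriends
  rw [pvA_eq_foldl, pvB_eq_foldl]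
  have : d.foldl (fun fd kv => pvStepA d fd kv.1) PySem.Dict.empty
      = d.foldl (pvStepB d) PySem.Dict.empty :=
    PySem.List.foldl_congr_mem d _ _ _ (fun fd kv hkv => pvStep_eq d hpre fd kv hkv)
  rw [this]
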